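-- pv_equiv track=rewrite | github.com/igot-ai/os-twin | dashboard/routes/amem.py | _parse_legacy_metadata
-- ===== SOURCE A (Python) =====
-- def _parse_legacy_metadata(text: str) -> tuple[list[str], list[str], list[str]]:
--     """Extract Tags/Keywords/Links from **bold-label**: lines in raw markdown."""
--     tags: list[str] = []
--     keywords: list[str] = []
--     links: list[str] = []
--     for line in text.split("\n"):
--         stripped = line.strip()
--         for label, target in [
--             ("**Tags**:", tags),
--             ("**Keywords**:", keywords),
--             ("**Links**:", links),
--         ]:
--             if stripped.startswith(label):
--                 value = stripped[len(label) :].strip()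
--                 items = [v.strip().lstrip("#") for v in value.split(",") if v.strip()]
--                 target.extend(items)
--     return tags, keywords, links
-- ===== SOURCE B (Python) =====
-- def _extract_field(text: str, label: str) -> list[str]:
--     items: list[str] = []
--     for line in text.split("\n"):
--         stripped = line.strip()
--         if stripped.startswith(label):
--             value = stripped[len(label):].strip()
--             items += [v.strip().lstrip("#") for v in value.split(",") if v.strip()]
--     return items
--
--
-- def _parse_legacy_metadata(text: str) -> tuple[list[str], list[str], list[str]]:
--     """Extract Tags/Keywords/Links from **bold-label**: lines in raw markdown."""
--     return (
--         _extract_field(text, "**Tags**:"),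
--         _extract_field(text, "**Keywords**:"),
--         _extract_field(text, "**Links**:"),
--     )
-- ===== Notes on version B (the rewrite author's own statement) =====
-- stated objective: simpler
-- what changed: One single-pass loop maintaining three accumulators with an inner label loop is replaced by a generic _extract_field helper run once per label: three independent line scans, no mutable triple state.
import Mathlib
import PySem

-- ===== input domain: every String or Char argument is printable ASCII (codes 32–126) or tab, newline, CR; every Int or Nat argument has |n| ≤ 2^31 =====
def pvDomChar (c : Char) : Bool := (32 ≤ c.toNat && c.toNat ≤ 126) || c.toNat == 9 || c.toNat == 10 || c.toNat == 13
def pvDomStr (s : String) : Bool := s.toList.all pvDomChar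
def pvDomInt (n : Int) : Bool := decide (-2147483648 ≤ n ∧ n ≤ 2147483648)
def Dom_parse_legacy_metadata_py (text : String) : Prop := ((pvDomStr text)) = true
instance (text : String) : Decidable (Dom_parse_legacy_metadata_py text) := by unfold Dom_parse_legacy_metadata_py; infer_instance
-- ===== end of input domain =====

-- B is a simpler decomposition: a generic per-label extractor run once per label (three
-- independent line scans) instead of A's single pass with a triple accumulator and inner label loop.

-- shared transliteration of the value-parsing line both Pythons contain verbatim:
-- [v.strip().lstrip("#") for v in stripped[len(label):].strip().split(",") if v.strip()]
-- (lstrip("#") is ported by hand as dropWhile (· == '#') on the code points — exact,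
-- since Python's lstrip drops exactly the maximal leading run of the given characters)
def pvItems (stripped label : String) : List String :=
  let value := PySem.Str.strip (PySem.Str.slice stripped (some (label.toList.length : Int)) none)
  (((PySem.Str.split? value ",").getD []).filter (fun v => !(PySem.Str.strip v == ""))).map
    (fun v => String.ofList ((PySem.Str.strip v).toList.dropWhile (· == '#')))

-- ===== PORT A =====
def pvStepA (st : List String × List String × List String) (line : String) :
    List String × List String × List String :=
  let stripped := PySem.Str.strip line
  let st := if PySem.Str.startswith stripped "**Tags**:" then
      (st.1 ++ pvItems stripped "**Tags**:", st.2.1, st.2.2) else st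
  let st := if PySem.Str.startswith stripped "**Keywords**:" then
      (st.1, st.2.1 ++ pvItems stripped "**Keywords**:", st.2.2) else st
  let st := if PySem.Str.startswith stripped "**Links**:" then
      (st.1, st.2.1, st.2.2 ++ pvItems stripped "**Links**:") else st
  st

def parse_legacy_metadata_py (text : String) : List String × List String × List String :=
  ((PySem.Str.split? text "\n").getD []).foldl pvStepA ([], [], [])

-- ===== PORT B =====
def pvStepB (label : String) (acc : List String) (line : String) : List String :=
  let stripped := PySem.Str.strip line
  if PySem.Str.startswith stripped label then acc ++ pvItems stripped label else acc

def pvExtractField (text label : String) : List String :=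
  ((PySem.Str.split? text "\n").getD []).foldl (pvStepB label) []

def parse_legacy_metadata_py_alt (text : String) : List String × List String × List String :=
  (pvExtractField text "**Tags**:",
   pvExtractField text "**Keywords**:",
   pvExtractField text "**Links**:")

-- ===== PRECONDITION & SPEC =====
def Spec_parse_legacy_metadata_py (text : String) (out : List String × List String × List String) : Prop := out = parse_legacy_metadata_py_alt text
instance (text : String) (out : List String × List String × List String) : Decidable (Spec_parse_legacy_metadata_py text out) := by unfold Spec_parse_legacy_metadata_py; infer_instance

-- ===== CLAIM (what is proved, stated in full; the proofs are below) =====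
def Claim_equal_parse_legacy_metadata_py : Prop := ∀ (text : String), Dom_parse_legacy_metadata_py text → Spec_parse_legacy_metadata_py text (parse_legacy_metadata_py text)

-- ===== LEMMAS AND PROOFS =====

lemma pvStepB_shift (label : String) (lines : List String) (acc : List String) :
    lines.foldl (pvStepB label) acc = acc ++ lines.foldl (pvStepB label) [] := by
  induction lines generalizing acc with
  | nil => simp
  | cons line rest ih =>
    simp only [List.foldl_cons]
    rw [ih (pvStepB label acc line), ih (pvStepB label [] line)]
    simp only [pvStepB]
    split_ifs <;> simp

lemma pvFold_split (lines : List String) (t k l : List String) :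
    lines.foldl pvStepA (t, k, l) =
      (t ++ lines.foldl (pvStepB "**Tags**:") [],
       k ++ lines.foldl (pvStepB "**Keywords**:") [],
       l ++ lines.foldl (pvStepB "**Links**:") []) := by
  induction lines generalizing t k l with
  | nil => simp
  | cons line rest ih =>
    simp only [List.foldl_cons]
    rw [ih]
    rw [pvStepB_shift "**Tags**:" rest (pvStepB "**Tags**:" [] line),
        pvStepB_shift "**Keywords**:" rest (pvStepB "**Keywords**:" [] line),
        pvStepB_shift "**Links**:" rest (pvStepB "**Links**:" [] line)]
    simp only [pvStepA, pvStepB]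
    split_ifs <;> simp

-- ===== VERDICT (by name: the statement is the Claim_ definition above) =====
theorem parse_legacy_metadata_py_spec : Claim_equal_parse_legacy_metadata_py := by
  intro text _
  unfold Spec_parse_legacy_metadata_py parse_legacy_metadata_py parse_legacy_metadata_py_alt pvExtractField
  rw [pvFold_split]
  simp
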